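-- pv_equiv track=rewrite | github.com/ryanwon3/teamdiff | app/services/matchup.py | _observations_from_participants
-- ===== SOURCE A (Python) =====
-- from typing import Any
--
-- def _observations_from_participants(
--     participants: list[dict[str, Any]],
--     champion_a: int,
--     champion_b: int,
-- ) -> tuple[int, int]:
--     """Single match: (wins_for_side_playing_A, games_where_A_and_B_on_opposite_teams)."""
--     pas = [p for p in participants if p.get("championId") == champion_a]
--     pbs = [p for p in participants if p.get("championId") == champion_b]
--     wins_a = 0
--     games = 0
--     for pa in pas:
--         for pb in pbs:
--             if pa.get("teamId") != pb.get("teamId"):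
--                 games += 1
--                 if pa.get("win"):
--                     wins_a += 1
--     return wins_a, games
-- ===== SOURCE B (Python) =====
-- from typing import Any
--
-- def _observations_from_participants(
--     participants: list[dict[str, Any]],
--     champion_a: int,
--     champion_b: int,
-- ) -> tuple[int, int]:
--     """Single match: (wins_for_side_playing_A, games_where_A_and_B_on_opposite_teams)."""
--     b_teams = [p.get("teamId") for p in participants if p.get("championId") == champion_b]
--     counts = {}
--     for t in b_teams:
--         counts[t] = counts.get(t, 0) + 1
--     total = len(b_teams)
--     wins_a = 0
--     games = 0
--     for p in participants:
--         if p.get("championId") == champion_a: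
--             opp = total - counts.get(p.get("teamId"), 0)
--             games += opp
--             if p.get("win"):
--                 wins_a += opp
--     return wins_a, games
-- ===== Notes on version B (the rewrite author's own statement) =====
-- stated objective: alternative
-- what changed: Replaced the nested loop over all (A-participant, B-participant) pairs by one pre-pass tallying B-participants' teamIds in a dict plus one pass over participants adding the opposite-team count per A-participant; avoids the quadratic pairing when many participants share the champion ids, though not measurably faster on typical inputs.
import Mathlib
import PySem

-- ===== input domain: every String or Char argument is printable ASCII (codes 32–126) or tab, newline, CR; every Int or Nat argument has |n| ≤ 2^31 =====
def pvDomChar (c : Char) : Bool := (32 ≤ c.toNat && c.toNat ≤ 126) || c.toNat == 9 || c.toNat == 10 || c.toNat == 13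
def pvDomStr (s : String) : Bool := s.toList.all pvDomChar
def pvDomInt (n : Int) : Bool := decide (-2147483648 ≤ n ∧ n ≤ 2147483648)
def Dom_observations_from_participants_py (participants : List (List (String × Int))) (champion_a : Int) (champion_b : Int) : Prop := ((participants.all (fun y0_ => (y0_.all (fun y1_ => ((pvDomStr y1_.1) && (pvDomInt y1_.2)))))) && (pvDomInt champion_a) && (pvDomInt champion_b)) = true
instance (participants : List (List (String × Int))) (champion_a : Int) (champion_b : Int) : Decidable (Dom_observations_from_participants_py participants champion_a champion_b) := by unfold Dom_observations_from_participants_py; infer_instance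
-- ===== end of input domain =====

-- B replaces A's nested pairwise loop by a teamId-tally dict over B-participants plus one pass over participants (alternative algorithm; not measurably faster on the timed inputs).

-- ===== PORT A =====
-- p.get(k) on a dict[str,int]: first-match lookup on the association list
def pvGet (p : List (String × Int)) (k : String) : Option Int :=
  PySem.Dict.get? (PySem.Dict.mk p) k

-- Python truthiness of p.get("win") (an int or missing)
def pvTruthy (o : Option Int) : Bool :=
  match o with
  | some w => w != 0
  | none => false

def observations_from_participants_py (participants : List (List (String × Int))) (champion_a : Int) (champion_b : Int) : Int × Int :=
  let pas := participants.filter (fun p => pvGet p "championId" == some champion_a)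
  let pbs := participants.filter (fun p => pvGet p "championId" == some champion_b)
  pas.foldl (fun (acc : Int × Int) pa =>
    pbs.foldl (fun (acc2 : Int × Int) pb =>
      if pvGet pa "teamId" != pvGet pb "teamId" then
        ((if pvTruthy (pvGet pa "win") then acc2.1 + 1 else acc2.1), acc2.2 + 1)
      else acc2) acc) ((0 : Int), (0 : Int))

-- ===== PORT B =====
def observations_from_participants_py_alt (participants : List (List (String × Int))) (champion_a : Int) (champion_b : Int) : Int × Int :=
  let bTeams := (participants.filter (fun p => pvGet p "championId" == some champion_b)).map (fun p => pvGet p "teamId")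
  let counts := bTeams.foldl (fun (d : PySem.Dict (Option Int) Int) t => d.insert t (d.getD t 0 + 1)) PySem.Dict.empty
  let total : Int := (bTeams.length : Int)
  participants.foldl (fun (acc : Int × Int) p =>
    if pvGet p "championId" == some champion_a then
      let opp := total - counts.getD (pvGet p "teamId") 0
      ((if pvTruthy (pvGet p "win") then acc.1 + opp else acc.1), acc.2 + opp)
    else acc) ((0 : Int), (0 : Int))

-- ===== PRECONDITION & SPEC =====
def Spec_observations_from_participants_py (participants : List (List (String × Int))) (champion_a : Int) (champion_b : Int) (out : Int × Int) : Prop := out = observations_from_participants_py_alt participants champion_a champion_b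
instance (participants : List (List (String × Int))) (champion_a : Int) (champion_b : Int) (out : Int × Int) : Decidable (Spec_observations_from_participants_py participants champion_a champion_b out) := by unfold Spec_observations_from_participants_py; infer_instance

-- ===== CLAIM (what is proved, stated in full; the proofs are below) =====
def Claim_equal_observations_from_participants_py : Prop := ∀ (participants : List (List (String × Int))) (champion_a : Int) (champion_b : Int), Dom_observations_from_participants_py participants champion_a champion_b → Spec_observations_from_participants_py participants champion_a champion_b (observations_from_participants_py participants champion_a champion_b)

-- ===== LEMMAS AND PROOFS =====

-- A's inner loop over pbs adds, in one shot, the number of opposite-team pbs (to wins only when pa won)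
theorem pv_inner_foldl_eq (pa : List (String × Int)) (pbs : List (List (String × Int))) (acc : Int × Int) :
    pbs.foldl (fun (acc2 : Int × Int) pb =>
      if pvGet pa "teamId" != pvGet pb "teamId" then
        ((if pvTruthy (pvGet pa "win") then acc2.1 + 1 else acc2.1), acc2.2 + 1)
      else acc2) acc
    = ((if pvTruthy (pvGet pa "win") then
          acc.1 + ((pbs.countP (fun pb => pvGet pa "teamId" != pvGet pb "teamId") : Nat) : Int)
        else acc.1),
       acc.2 + ((pbs.countP (fun pb => pvGet pa "teamId" != pvGet pb "teamId") : Nat) : Int)) := by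
  induction pbs generalizing acc with
  | nil => simp
  | cons pb rest ih =>
    simp only [List.foldl_cons, List.countP_cons]
    by_cases h : (pvGet pa "teamId" != pvGet pb "teamId") = true
    · rw [if_pos h, ih]
      by_cases hw : pvTruthy (pvGet pa "win") = true <;>
        refine Prod.ext ?_ ?_ <;> simp [hw, h] <;> omega
    · rw [if_neg h, ih]
      simp [h]

-- number of opposite-team B-participants, computed A's way, equals B's "total - count of my team"
theorem pv_opp_count (pa : List (String × Int)) (pbs : List (List (String × Int))) :
    ((pbs.countP (fun pb => pvGet pa "teamId" != pvGet pb "teamId") : Nat) : Int)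
    = ((pbs.map (fun p => pvGet p "teamId")).length : Int)
      - (((pbs.map (fun p => pvGet p "teamId")).count (pvGet pa "teamId") : Nat) : Int) := by
  have hc : (pbs.map (fun p => pvGet p "teamId")).count (pvGet pa "teamId")
      = pbs.countP (fun pb => pvGet pa "teamId" == pvGet pb "teamId") := by
    simp only [List.count, List.countP_map]
    exact List.countP_congr (fun pb _ => by simp [Function.comp, BEq.comm])
  have hl := List.length_eq_countP_add_countP
    (p := fun pb => pvGet pa "teamId" == pvGet pb "teamId") (l := pbs)
  have hne : pbs.countP (fun pb => pvGet pa "teamId" != pvGet pb "teamId")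
      = pbs.countP (fun pb => decide ¬((pvGet pa "teamId" == pvGet pb "teamId") = true)) :=
    List.countP_congr (fun pb _ => by simp [bne])
  simp only [List.length_map, hc, hne]
  omega

-- the counter built by B's first loop looks up to the exact multiplicity
theorem pv_counts_getD (bTeams : List (Option Int)) (t : Option Int) :
    (bTeams.foldl (fun (d : PySem.Dict (Option Int) Int) t => d.insert t (d.getD t 0 + 1))
        PySem.Dict.empty).getD t 0 = ((bTeams.count t : Nat) : Int) := by
  rw [PySem.Dict.getD_foldl_insert_add_one]
  simp

theorem pv_main_eq (participants : List (List (String × Int))) (champion_a champion_b : Int) :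
    observations_from_participants_py participants champion_a champion_b
    = observations_from_participants_py_alt participants champion_a champion_b := by
  simp only [observations_from_participants_py, observations_from_participants_py_alt]
  rw [← List.foldl_filter]
  have hstep : (fun (acc : Int × Int) pa =>
      (participants.filter (fun p => pvGet p "championId" == some champion_b)).foldl
        (fun (acc2 : Int × Int) pb =>
          if pvGet pa "teamId" != pvGet pb "teamId" then
            ((if pvTruthy (pvGet pa "win") then acc2.1 + 1 else acc2.1), acc2.2 + 1)
          else acc2) acc)
    = (fun (acc : Int × Int) p =>
        let opp : Int :=
          (((participants.filter (fun p => pvGet p "championId" == some champion_b)).map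
              (fun p => pvGet p "teamId")).length : Int)
          - (((participants.filter (fun p => pvGet p "championId" == some champion_b)).map
                (fun p => pvGet p "teamId")).foldl
              (fun (d : PySem.Dict (Option Int) Int) t => d.insert t (d.getD t 0 + 1))
              PySem.Dict.empty).getD (pvGet p "teamId") 0
        ((if pvTruthy (pvGet p "win") then acc.1 + opp else acc.1), acc.2 + opp)) := by
    funext acc pa
    simp only [pv_inner_foldl_eq, pv_opp_count, pv_counts_getD]
  rw [hstep]

-- ===== VERDICT (by name: the statement is the Claim_ definition above) =====
theorem observations_from_participants_py_spec : Claim_equal_observations_from_participants_py := by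
  intro participants champion_a champion_b _
  unfold Spec_observations_from_participants_py
  exact pv_main_eq participants champion_a champion_b
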